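-- pv_equiv track=rewrite | github.com/seungriyou/algorithm-study | Data-Structure/Array/LTC-1909.py | canBeIncreasing2
-- ===== SOURCE A (Python) =====
-- from typing import List
--
-- def canBeIncreasing2(nums: List[int]) -> bool:
--     # len(nums) <= 2이면 return True
--     if len(nums) <= 2:
--         return True
--
--     removed_idx, curr_idx = -1, 1
--
--     while curr_idx < len(nums):
--         # nums[curr_idx - 1] < nums[curr_idx] 가 아니라면
--         if nums[curr_idx] <= nums[curr_idx - 1]:
--             # 기존에 removed 된 내역이 있는 경우, return False
--             if removed_idx > -1:
--                 return False
--
--             # curr_idx > 1 이고 nums[curr_idx - 2] >= nums[curr_idx] 이면, curr_idx가 removed 되어야 함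
--             # -- ex) [105(*), 924, 32(curr_idx, removed_idx), 968]
--             if curr_idx > 1 and nums[curr_idx] <= nums[curr_idx - 2]:
--                 removed_idx = curr_idx
--
--             # 아니라면, curr_idx - 1가 removed 되어야 함
--             # -- ex) [1, 2(*), 10(removed_idx), 5(curr_idx), 7]
--             # -- ex) [100(removed_idx), 21(curr_idx), 100]
--             else:
--                 removed_idx = curr_idx - 1
--
--         # nums[curr_idx - 1] < nums[curr_idx]이고, removed_idx가 curr_idx의 바로 왼쪽 옆이라면
--         elif removed_idx + 1 == curr_idx:
--             # curr_idx - 2와도 비교하여, 이것보다 작거나 같으면 return False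
--             # -- ex) [541, 783(*), 433(removed_idx), 744(curr_idx)]
--             if nums[curr_idx - 2] >= nums[curr_idx]:
--                 return False
--
--         curr_idx += 1
--
--     return True
-- ===== SOURCE B (Python) =====
-- from typing import List
--
-- def canBeIncreasing2(nums: List[int]) -> bool:
--     n = len(nums)
--     viol = [i for i in range(1, n) if nums[i] <= nums[i - 1]]
--     if not viol:
--         return True
--     if len(viol) > 1:
--         return False
--     i = viol[0]
--     return i == 1 or nums[i - 2] < nums[i] or i == n - 1 or nums[i - 1] < nums[i + 1]
-- ===== Notes on version B (the rewrite author's own statement) =====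
-- stated objective: simpler
-- what changed: Replaces A's stateful while-loop tracking removed_idx with a stateless decomposition: collect all violation indices in one comprehension, then decide by a closed-form condition on the unique violation (if any).
import Mathlib
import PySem

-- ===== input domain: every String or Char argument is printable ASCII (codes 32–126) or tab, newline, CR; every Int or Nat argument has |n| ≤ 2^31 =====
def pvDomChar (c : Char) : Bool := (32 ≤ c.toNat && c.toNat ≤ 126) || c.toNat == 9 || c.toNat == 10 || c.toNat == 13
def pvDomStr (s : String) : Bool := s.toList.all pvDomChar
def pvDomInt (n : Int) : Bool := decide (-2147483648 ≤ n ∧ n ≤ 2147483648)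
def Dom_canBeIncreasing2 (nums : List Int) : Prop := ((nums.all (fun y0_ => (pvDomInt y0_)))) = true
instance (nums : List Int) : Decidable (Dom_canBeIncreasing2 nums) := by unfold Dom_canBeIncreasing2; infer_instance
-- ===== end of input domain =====

-- B replaces A's stateful while-loop (removed_idx bookkeeping) by one violation-index
-- comprehension plus a closed-form decision on the unique violation; objective: simpler.

-- ===== PORT A =====
-- the while loop of A; `removed` = removed_idx (Int, -1 = nothing removed), `curr` = curr_idx.
-- Indices use Nat subtraction; faithful since the loop only reads curr-1 (curr ≥ 1) and
-- curr-2 under the guard 1 < curr, matching Python's nonnegative accesses.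
def loopA (nums : List Int) (removed : Int) (curr : Nat) : Bool :=
  if curr < nums.length then
    if nums.getD curr 0 ≤ nums.getD (curr - 1) 0 then
      if removed > -1 then false
      else if 1 < curr ∧ nums.getD curr 0 ≤ nums.getD (curr - 2) 0 then
        loopA nums (curr : Int) (curr + 1)
      else
        loopA nums ((curr : Int) - 1) (curr + 1)
    else if removed + 1 = (curr : Int) then
      if nums.getD curr 0 ≤ nums.getD (curr - 2) 0 then false
      else loopA nums removed (curr + 1)
    else loopA nums removed (curr + 1)
  else true
termination_by nums.length - curr

def canBeIncreasing2 (nums : List Int) : Bool :=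
  if nums.length ≤ 2 then true
  else loopA nums (-1) 1

-- ===== PORT B =====
def canBeIncreasing2_alt (nums : List Int) : Bool :=
  let n := nums.length
  let viol := (List.range' 1 (n - 1)).filter (fun i => nums.getD i 0 ≤ nums.getD (i - 1) 0)
  if viol = [] then true
  else if 1 < viol.length then false
  else
    let i := viol.headD 0
    (i == 1) || decide (nums.getD (i - 2) 0 < nums.getD i 0) ||
    (i == n - 1) || decide (nums.getD (i - 1) 0 < nums.getD (i + 1) 0)

-- ===== PRECONDITION & SPEC =====
def Spec_canBeIncreasing2 (nums : List Int) (out : Bool) : Prop := out = canBeIncreasing2_alt nums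
instance (nums : List Int) (out : Bool) : Decidable (Spec_canBeIncreasing2 nums out) := by unfold Spec_canBeIncreasing2; infer_instance

-- ===== CLAIM (what is proved, stated in full; the proofs are below) =====
def Claim_equal_canBeIncreasing2 : Prop := ∀ (nums : List Int), Dom_canBeIncreasing2 nums → Spec_canBeIncreasing2 nums (canBeIncreasing2 nums)

-- ===== LEMMAS AND PROOFS =====

-- the violation predicate and the list of violations at indices ≥ curr
def pvP (nums : List Int) (i : Nat) : Bool := nums.getD i 0 ≤ nums.getD (i - 1) 0

def pvV (nums : List Int) (curr : Nat) : List Nat :=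
  (List.range' curr (nums.length - curr)).filter (pvP nums)

lemma pvV_step {nums : List Int} {curr : Nat} (h : curr < nums.length) :
    pvV nums curr = if pvP nums curr then curr :: pvV nums (curr + 1) else pvV nums (curr + 1) := by
  unfold pvV
  have hn : nums.length - curr = (nums.length - (curr + 1)) + 1 := by omega
  rw [hn, List.range'_succ, List.filter_cons]

-- phase: something already removed, and the elif guard can never fire again
lemma loopA_far (nums : List Int) :
    ∀ k curr (removed : Int), nums.length - curr = k → removed > -1 → removed + 1 < (curr : Int) →
      loopA nums removed curr = decide (pvV nums curr = []) := by
  intro k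
  induction k with
  | zero =>
    intro curr removed hk _ _
    rw [loopA]
    unfold pvV
    have h0 : nums.length - curr = 0 := by omega
    simp [h0, show ¬ curr < nums.length by omega]
  | succ k ih =>
    intro curr removed hk hr hlt
    have h : curr < nums.length := by omega
    rw [loopA, if_pos h, pvV_step h]
    by_cases hp : pvP nums curr
    · have hp' : nums.getD curr 0 ≤ nums.getD (curr - 1) 0 := by
        simpa [pvP] using hp
      rw [if_pos hp', if_pos hr, if_pos hp]
      simp
    · have hp' : ¬ nums.getD curr 0 ≤ nums.getD (curr - 1) 0 := by
        simpa [pvP] using hp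
      have hne : ¬ removed + 1 = (curr : Int) := by omega
      rw [if_neg hp', if_neg hne, if_neg hp, ih (curr + 1) removed (by omega) hr (by omega)]

-- phase: just removed curr-1 (removed = curr - 1 ≥ 0): one extra cross check at curr
lemma loopA_adj (nums : List Int) :
    ∀ k curr, nums.length - curr = k → 1 ≤ curr →
      loopA nums ((curr : Int) - 1) curr =
        decide (pvV nums curr = [] ∧
          (curr < nums.length → nums.getD (curr - 2) 0 < nums.getD curr 0)) := by
  intro k
  induction k with
  | zero =>
    intro curr hk _
    rw [loopA]
    unfold pvV
    have h0 : nums.length - curr = 0 := by omega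
    simp [h0, show ¬ curr < nums.length by omega]
  | succ k ih =>
    intro curr hk hc
    have h : curr < nums.length := by omega
    rw [loopA, if_pos h, pvV_step h]
    by_cases hp : pvP nums curr
    · have hp' : nums.getD curr 0 ≤ nums.getD (curr - 1) 0 := by simpa [pvP] using hp
      have hr : (curr : Int) - 1 > -1 := by omega
      rw [if_pos hp', if_pos hr, if_pos hp]
      simp
    · have hp' : ¬ nums.getD curr 0 ≤ nums.getD (curr - 1) 0 := by simpa [pvP] using hp
      have heq : (curr : Int) - 1 + 1 = (curr : Int) := by ring
      rw [if_neg hp', if_pos heq, if_neg hp]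
      by_cases hx : nums.getD curr 0 ≤ nums.getD (curr - 2) 0
      · have hnx : ¬ nums.getD (curr - 2) 0 < nums.getD curr 0 := not_lt.mpr hx
        rw [if_pos hx]
        symm
        rw [decide_eq_false_iff_not]
        rintro ⟨-, h2⟩
        exact hnx (h2 h)
      · rw [if_neg hx,
          loopA_far nums (nums.length - (curr + 1)) (curr + 1) ((curr : Int) - 1) rfl
            (by omega) (by omega)]
        have hlx : nums.getD (curr - 2) 0 < nums.getD curr 0 := lt_of_not_ge hx
        rw [decide_eq_decide]
        exact ⟨fun hv => ⟨hv, fun _ => hlx⟩, fun hv => hv.1⟩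

-- phase: nothing removed yet; result characterised by the first violation
def pvRes (nums : List Int) : List Nat → Bool
  | [] => true
  | i :: rest =>
    if 1 < i ∧ nums.getD i 0 ≤ nums.getD (i - 2) 0 then
      decide (rest = [] ∧
        (i + 1 < nums.length → nums.getD (i - 1) 0 < nums.getD (i + 1) 0))
    else decide (rest = [])

lemma loopA_fresh (nums : List Int) :
    ∀ k curr, nums.length - curr = k → 1 ≤ curr →
      loopA nums (-1) curr = pvRes nums (pvV nums curr) := by
  intro k
  induction k with
  | zero =>
    intro curr hk _
    rw [loopA]
    unfold pvV
    have h0 : nums.length - curr = 0 := by omega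
    simp [h0, show ¬ curr < nums.length by omega, pvRes]
  | succ k ih =>
    intro curr hk hc
    have h : curr < nums.length := by omega
    rw [loopA, if_pos h, pvV_step h]
    by_cases hp : pvP nums curr
    · have hp' : nums.getD curr 0 ≤ nums.getD (curr - 1) 0 := by simpa [pvP] using hp
      rw [if_pos hp, if_pos hp', if_neg (by norm_num : ¬ ((-1 : Int) > -1))]
      show _ = if 1 < curr ∧ nums.getD curr 0 ≤ nums.getD (curr - 2) 0 then _ else _
      by_cases hcond : 1 < curr ∧ nums.getD curr 0 ≤ nums.getD (curr - 2) 0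
      · rw [if_pos hcond, if_pos hcond,
          show ((curr : Int)) = ((curr + 1 : Nat) : Int) - 1 by push_cast; ring,
          loopA_adj nums (nums.length - (curr + 1)) (curr + 1) rfl (by omega)]
        have h2 : curr + 1 - 2 = curr - 1 := by omega
        rw [h2]
      · rw [if_neg hcond, if_neg hcond,
          loopA_far nums (nums.length - (curr + 1)) (curr + 1) ((curr : Int) - 1) rfl
            (by omega) (by omega)]
    · have hp' : ¬ nums.getD curr 0 ≤ nums.getD (curr - 1) 0 := by simpa [pvP] using hp
      have hne : ¬ (-1 : Int) + 1 = (curr : Int) := by omega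
      rw [if_neg hp, if_neg hp', if_neg hne, ih (curr + 1) (by omega) (by omega)]

-- ===== VERDICT (by name: the statement is the Claim_ definition above) =====
-- B's decision, as a function of the violation list (proof-local restatement of B's body)
def pvAltRes (nums : List Int) (viol : List Nat) : Bool :=
  if viol = [] then true
  else if 1 < viol.length then false
  else
    let i := viol.headD 0
    (i == 1) || decide (nums.getD (i - 2) 0 < nums.getD i 0) ||
    (i == nums.length - 1) || decide (nums.getD (i - 1) 0 < nums.getD (i + 1) 0)

-- ===== VERDICT (by name: the statement is the Claim_ definition above) =====
theorem canBeIncreasing2_spec : Claim_equal_canBeIncreasing2 := by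
  intro nums _
  unfold Spec_canBeIncreasing2 canBeIncreasing2
  have hAlt : canBeIncreasing2_alt nums = pvAltRes nums (pvV nums 1) := rfl
  rw [hAlt]
  by_cases h2 : nums.length ≤ 2
  · rw [if_pos h2]
    have hd : nums.length - 1 = 0 ∨ nums.length - 1 = 1 := by omega
    rcases hd with hd | hd
    · have hz : pvV nums 1 = [] := by unfold pvV; rw [hd]; rfl
      rw [hz]
      rfl
    · have hr : pvV nums 1 = List.filter (pvP nums) [1] := by unfold pvV; rw [hd]; rfl
      by_cases hp : pvP nums 1
      · have h1 : pvV nums 1 = [1] := by rw [hr, List.filter_cons]; simp [hp]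
        rw [h1]
        rfl
      · have h0 : pvV nums 1 = [] := by rw [hr, List.filter_cons]; simp [hp]
        rw [h0]
        rfl
  · rw [if_neg h2, loopA_fresh nums (nums.length - 1) 1 rfl le_rfl]
    rcases hv : pvV nums 1 with _ | ⟨i, rest⟩
    · rfl
    · have hi : i ∈ List.range' 1 (nums.length - 1) := by
        have hm : i ∈ pvV nums 1 := by rw [hv]; exact List.mem_cons_self
        exact List.mem_of_mem_filter hm
      have hib : 1 ≤ i ∧ i < nums.length := by
        rcases List.mem_range'_1.mp hi with ⟨ha, hb⟩
        exact ⟨ha, by omega⟩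
      rcases rest with _ | ⟨r, rs⟩
      · have hA : pvAltRes nums [i] =
            ((i == 1) || decide (nums.getD (i - 2) 0 < nums.getD i 0) ||
             (i == nums.length - 1) || decide (nums.getD (i - 1) 0 < nums.getD (i + 1) 0)) := rfl
        have hR : pvRes nums [i] =
            (if 1 < i ∧ nums.getD i 0 ≤ nums.getD (i - 2) 0 then
              decide (i + 1 < nums.length → nums.getD (i - 1) 0 < nums.getD (i + 1) 0)
            else true) := by
          show (if 1 < i ∧ nums.getD i 0 ≤ nums.getD (i - 2) 0 then
              decide (([] : List Nat) = [] ∧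
                (i + 1 < nums.length → nums.getD (i - 1) 0 < nums.getD (i + 1) 0))
            else decide (([] : List Nat) = [])) = _
          split
          · rw [decide_eq_decide]
            simp
          · rfl
        rw [hA, hR]
        by_cases hcond : 1 < i ∧ nums.getD i 0 ≤ nums.getD (i - 2) 0
        · rw [if_pos hcond]
          have e1 : (i == 1) = false := by simp only [beq_eq_false_iff_ne]; omega
          have e2 : decide (nums.getD (i - 2) 0 < nums.getD i 0) = false :=
            decide_eq_false (not_lt.mpr hcond.2)
          rw [e1, e2]
          by_cases hpl : i + 1 < nums.length
          · have e3 : (i == nums.length - 1) = false := by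
              simp only [beq_eq_false_iff_ne]; omega
            have e4 : decide (i + 1 < nums.length →
                  nums.getD (i - 1) 0 < nums.getD (i + 1) 0)
                = decide (nums.getD (i - 1) 0 < nums.getD (i + 1) 0) := by
              rw [decide_eq_decide]
              exact ⟨fun f => f hpl, fun q _ => q⟩
            rw [e3, e4]
            simp
          · have e3 : (i == nums.length - 1) = true := by
              simp only [beq_iff_eq]; omega
            have e4 : decide (i + 1 < nums.length →
                  nums.getD (i - 1) 0 < nums.getD (i + 1) 0) = true :=
              decide_eq_true (fun hx => absurd hx hpl)
            rw [e3, e4]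
            simp
        · rw [if_neg hcond]
          by_cases h1 : i = 1
          · simp [h1]
          · have hx : nums.getD (i - 2) 0 < nums.getD i 0 :=
              lt_of_not_ge (fun hx => hcond ⟨by omega, hx⟩)
            simp
            exact Or.inl (Or.inl (Or.inr hx))
      · have hRf : pvRes nums (i :: r :: rs) = false := by
          show (if 1 < i ∧ nums.getD i 0 ≤ nums.getD (i - 2) 0 then false else false) = false
          split <;> rfl
        rw [hRf]
        rfl
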